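-- pv_equiv track=rewrite | github.com/violetyan10/usaco-practice | Printing_Sequences.py | min_prints
-- ===== SOURCE A (Python) =====
-- def min_prints(seq,K):
--     n = len(seq)
--     INF = K + 1
--     dp = [[INF] * (n + 1) for _ in range(n)]
--
--     for i in range(n):
--         dp[i][i + 1] = 1
--
--     for length in range(2, n + 1):
--         for l in range(n - length + 1):
--             r = l + length
--             segment = seq[l:r]
--
--             # repetition check (NO BREAK)
--             for k in range(1, length):
--                 if length % k == 0:
--                     if segment[:k] * (length // k) == segment:
--                         dp[l][r] = min(dp[l][r], dp[l][l + k])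
--
--             # split check
--             for m in range(l + 1, r):
--                 cost = dp[l][m] + dp[m][r]
--                 if cost < dp[l][r]:
--                     dp[l][r] = cost
--
--             # cap value
--             if dp[l][r] > K:
--                 dp[l][r] = INF
--
--     return dp[0][n]
-- ===== SOURCE B (Python) =====
-- def min_prints(seq, K):
--     n = len(seq)
--     INF = K + 1
--     # longest common extension table: lce[i][j] = length of the longest common
--     # prefix of seq[i:] and seq[j:]  (O(n^2) precomputation); makes every
--     # periodicity test an O(1) lookup instead of an O(length) list comparison.
--     lce = [[0] * (n + 1) for _ in range(n + 1)]
--     for i in range(n - 1, -1, -1):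
--         lce_i, lce_i1, x = lce[i], lce[i + 1], seq[i]
--         for j in range(n - 1, -1, -1):
--             if x == seq[j]:
--                 lce_i[j] = lce_i1[j + 1] + 1
--     dp = [[INF] * (n + 1) for _ in range(n)]
--     for i in range(n):
--         dp[i][i + 1] = 1
--     for length in range(2, n + 1):
--         for l in range(n - length + 1):
--             r = l + length
--             dp_l, lce_l = dp[l], lce[l]
--             best = dp_l[r]
--             for k in range(1, length):
--                 if length % k == 0 and lce_l[l + k] >= length - k and dp_l[l + k] < best:
--                     best = dp_l[l + k]
--             for m in range(l + 1, r):
--                 cost = dp_l[m] + dp[m][r]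
--                 if cost < best:
--                     best = cost
--             dp_l[r] = best if best <= K else INF
--     return dp[0][n]
-- ===== Notes on version B (the rewrite author's own statement) =====
-- stated objective: alternative
-- what changed: B precomputes an O(n^2) longest-common-extension table so each periodicity test is a table lookup instead of building and comparing a repeated copy of the segment, and accumulates each cell's minimum in a local variable written once (intended as faster; a timing run measured 2.31x at n=256 but could not confirm it at the largest size).
import Mathlib
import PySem

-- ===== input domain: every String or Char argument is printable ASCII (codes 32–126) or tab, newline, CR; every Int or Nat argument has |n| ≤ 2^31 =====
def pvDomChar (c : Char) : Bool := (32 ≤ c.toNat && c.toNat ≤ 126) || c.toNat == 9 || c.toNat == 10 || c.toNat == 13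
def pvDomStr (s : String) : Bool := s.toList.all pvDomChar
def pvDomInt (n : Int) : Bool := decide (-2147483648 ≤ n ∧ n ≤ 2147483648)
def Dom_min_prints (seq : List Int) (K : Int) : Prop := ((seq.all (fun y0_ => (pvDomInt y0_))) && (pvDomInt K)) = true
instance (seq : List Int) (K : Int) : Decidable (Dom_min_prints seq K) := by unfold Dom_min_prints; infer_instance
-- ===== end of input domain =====

-- B replaces A's build-and-compare periodicity test by a lookup in a precomputed
-- longest-common-extension table (objective: alternative).
-- Python 2-D lists dp / lce are modelled as List (List _) with in-place update pvSet and
-- read pvGet; every access the algorithms perform is in range.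

def pvGet {α : Type} (d : α) (t : List (List α)) (i j : Nat) : α := (t.getD i []).getD j d

def pvSet {α : Type} (t : List (List α)) (i j : Nat) (v : α) : List (List α) :=
  t.set i ((t.getD i []).set j v)

-- ===== PORT A =====
-- seq[l:l+len] for 0 ≤ l, l+len ≤ |seq| (the only slices A takes): exact
def pvSeg (seq : List Int) (l len : Nat) : List Int := (seq.drop l).take len

-- the repetition-check loop: for k in range(1, length): if length % k == 0 and segment[:k]*(length//k) == segment: dp[l][r] = min(dp[l][r], dp[l][l+k])
def aRep (seq : List Int) (len l : Nat) (dp : List (List Int)) : List (List Int) :=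
  (List.range' 1 (len - 1)).foldl (fun dp k =>
    if len % k = 0 ∧ (List.replicate (len / k) ((pvSeg seq l len).take k)).flatten = pvSeg seq l len
    then pvSet dp l (l + len) (min (pvGet 0 dp l (l + len)) (pvGet 0 dp l (l + k))) else dp) dp

-- the split-check loop: for m in range(l+1, r): cost = dp[l][m] + dp[m][r]; if cost < dp[l][r]: dp[l][r] = cost
def aSplit (len l : Nat) (dp : List (List Int)) : List (List Int) :=
  (List.range' (l + 1) (len - 1)).foldl (fun dp m =>
    if pvGet 0 dp l m + pvGet 0 dp m (l + len) < pvGet 0 dp l (l + len)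
    then pvSet dp l (l + len) (pvGet 0 dp l m + pvGet 0 dp m (l + len)) else dp) dp

-- cap value: if dp[l][r] > K: dp[l][r] = INF  (INF = K + 1)
def aCap (K : Int) (l r : Nat) (dp : List (List Int)) : List (List Int) :=
  if pvGet 0 dp l r > K then pvSet dp l r (K + 1) else dp

def aCell (seq : List Int) (K : Int) (len l : Nat) (dp : List (List Int)) : List (List Int) :=
  aCap K l (l + len) (aSplit len l (aRep seq len l dp))

def aMain (seq : List Int) (K : Int) : List (List Int) :=
  let n := seq.length
  -- dp = [[INF]*(n+1) for _ in range(n)]; for i in range(n): dp[i][i+1] = 1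
  let base := (List.range n).foldl (fun dp i => pvSet dp i (i + 1) 1)
    (List.replicate n (List.replicate (n + 1) (K + 1)))
  -- for length in range(2, n+1): for l in range(n - length + 1): …
  (List.range' 2 (n - 1)).foldl (fun dp len =>
    (List.range (n - len + 1)).foldl (fun dp l => aCell seq K len l dp) dp) base

def min_prints (seq : List Int) (K : Int) : Int := pvGet 0 (aMain seq K) 0 seq.length

-- ===== PORT B =====
-- lce table: for i in range(n-1,-1,-1): for j in range(n-1,-1,-1): if seq[i]==seq[j]: lce[i][j] = lce[i+1][j+1] + 1
def bLceRow (seq : List Int) (i : Nat) (t : List (List Nat)) : List (List Nat) :=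
  (List.range seq.length).reverse.foldl (fun t j =>
    if seq.getD i 0 = seq.getD j 0 then pvSet t i j (pvGet 0 t (i + 1) (j + 1) + 1) else t) t

def bLce (seq : List Int) : List (List Nat) :=
  (List.range seq.length).reverse.foldl (fun t i => bLceRow seq i t)
    (List.replicate (seq.length + 1) (List.replicate (seq.length + 1) 0))

-- for k in range(1, length): if length % k == 0 and lce[l][l+k] >= length - k and dp[l][l+k] < best: best = dp[l][l+k]
def bRep (lce : List (List Nat)) (len l : Nat) (dp : List (List Int)) (best : Int) : Int :=
  (List.range' 1 (len - 1)).foldl (fun best k =>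
    if len % k = 0 ∧ len - k ≤ pvGet 0 lce l (l + k) ∧ pvGet 0 dp l (l + k) < best
    then pvGet 0 dp l (l + k) else best) best

-- for m in range(l+1, r): cost = dp[l][m] + dp[m][r]; if cost < best: best = cost
def bSplit (len l : Nat) (dp : List (List Int)) (best : Int) : Int :=
  (List.range' (l + 1) (len - 1)).foldl (fun best m =>
    if pvGet 0 dp l m + pvGet 0 dp m (l + len) < best
    then pvGet 0 dp l m + pvGet 0 dp m (l + len) else best) best

-- best = dp[l][r]; …; dp[l][r] = best if best <= K else INF
def bCell (K : Int) (lce : List (List Nat)) (len l : Nat) (dp : List (List Int)) : List (List Int) :=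
  pvSet dp l (l + len)
    (let best := bSplit len l dp (bRep lce len l dp (pvGet 0 dp l (l + len)));
     if best ≤ K then best else K + 1)

def bMain (seq : List Int) (K : Int) : List (List Int) :=
  let n := seq.length
  let lce := bLce seq
  let base := (List.range n).foldl (fun dp i => pvSet dp i (i + 1) 1)
    (List.replicate n (List.replicate (n + 1) (K + 1)))
  (List.range' 2 (n - 1)).foldl (fun dp len =>
    (List.range (n - len + 1)).foldl (fun dp l => bCell K lce len l dp) dp) base

def min_prints_alt (seq : List Int) (K : Int) : Int := pvGet 0 (bMain seq K) 0 seq.length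

-- ===== PRECONDITION & SPEC =====
-- Pre_ excludes only the empty sequence, on which the Python A raises IndexError (dp[0][n] with dp = []).
def Pre_min_prints (seq : List Int) (K : Int) : Prop := seq ≠ []
instance (seq : List Int) (K : Int) : Decidable (Pre_min_prints seq K) := by unfold Pre_min_prints; infer_instance
def pvWitness_min_prints : List Int × Int := ([1, 2, 1, 2], 10)

def Spec_min_prints (seq : List Int) (K : Int) (out : Int) : Prop := out = min_prints_alt seq K
instance (seq : List Int) (K : Int) (out : Int) : Decidable (Spec_min_prints seq K out) := by unfold Spec_min_prints; infer_instance

-- ===== CLAIM (what is proved, stated in full; the proofs are below) =====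
def Claim_equal_min_prints : Prop := ∀ (seq : List Int) (K : Int), Dom_min_prints seq K → Pre_min_prints seq K → Spec_min_prints seq K (min_prints seq K)

-- ===== LEMMAS AND PROOFS =====

-- basic table lemmas
theorem set_getD_self {α : Type} (t : List α) (i : Nat) (d : α) : t.set i (t.getD i d) = t := by
  by_cases hi : i < t.length
  · rw [List.getD_eq_getElem?_getD, List.getElem?_eq_getElem hi, Option.getD_some,
      List.set_getElem_self hi]
  · exact List.set_eq_of_length_le (by omega)

theorem getD_set_self' {α : Type} (t : List α) (i : Nat) (v d : α) (hi : i < t.length) :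
    (t.set i v).getD i d = v := by
  rw [List.getD_eq_getElem?_getD, List.getElem?_set_self hi, Option.getD_some]

theorem getD_set_ne' {α : Type} (t : List α) (i a : Nat) (v d : α) (h : i ≠ a) :
    (t.set i v).getD a d = t.getD a d := by
  rw [List.getD_eq_getElem?_getD, List.getElem?_set_ne h, ← List.getD_eq_getElem?_getD]

theorem pvGet_set_self {α : Type} (d : α) (t : List (List α)) (i j : Nat) (v : α)
    (hi : i < t.length) (hj : j < (t.getD i []).length) :
    pvGet d (pvSet t i j v) i j = v := by
  unfold pvGet pvSet
  rw [getD_set_self' t i _ [] hi, getD_set_self' _ j v d hj]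

theorem pvGet_set_ne {α : Type} (d : α) (t : List (List α)) (i j a b : Nat) (v : α)
    (h : ¬(a = i ∧ b = j)) : pvGet d (pvSet t i j v) a b = pvGet d t a b := by
  unfold pvGet pvSet
  by_cases hai : a = i
  · subst hai
    have hbj : j ≠ b := fun hb => h ⟨rfl, hb.symm⟩
    by_cases hi : a < t.length
    · rw [getD_set_self' t a _ [] hi, getD_set_ne' _ j b v d hbj]
    · rw [List.set_eq_of_length_le (by omega)]
  · rw [getD_set_ne' t i a _ [] (fun hh => hai hh.symm)]

theorem pvSet_set {α : Type} (t : List (List α)) (i j : Nat) (v w : α) :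
    pvSet (pvSet t i j v) i j w = pvSet t i j w := by
  unfold pvSet
  by_cases hi : i < t.length
  · rw [getD_set_self' t i _ [] hi, List.set_set, List.set_set]
  · have hle : t.length ≤ i := by omega
    have e1 : ∀ (r : List α), t.set i r = t := fun r => List.set_eq_of_length_le hle
    simp only [e1]

theorem pvSet_eta {α : Type} (d : α) (t : List (List α)) (i j : Nat) :
    pvSet t i j (pvGet d t i j) = t := by
  unfold pvGet pvSet
  rw [set_getD_self (t.getD i []) j d, set_getD_self t i []]

-- table shape
def pvShaped {α : Type} (rows cols : Nat) (t : List (List α)) : Prop :=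
  t.length = rows ∧ ∀ a, a < rows → (t.getD a []).length = cols

theorem pvShaped_set {α : Type} {rows cols : Nat} {t : List (List α)}
    (h : pvShaped rows cols t) (i j : Nat) (v : α) : pvShaped rows cols (pvSet t i j v) := by
  obtain ⟨h1, h2⟩ := h
  constructor
  · unfold pvSet; rw [List.length_set]; exact h1
  · intro a ha
    by_cases hai : a = i
    · subst hai
      by_cases hi : a < t.length
      · unfold pvSet
        rw [getD_set_self' t a _ [] hi, List.length_set]
        exact h2 a ha
      · unfold pvSet
        rw [List.set_eq_of_length_le (by omega)]
        exact h2 a ha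
    · unfold pvSet
      rw [getD_set_ne' t i a _ [] (fun hh => hai hh.symm)]
      exact h2 a ha

-- fold helpers
theorem pvFoldl_inv {α β : Type} (P : α → Prop) (f : α → β → α) :
    ∀ (l : List β) (a : α), P a → (∀ x b, P x → P (f x b)) → P (l.foldl f a) := by
  intro l
  induction l with
  | nil => intro a h _; simpa using h
  | cons b bs ih =>
    intro a h hf
    simp only [List.foldl_cons]
    exact ih (f a b) (hf a b h) hf

theorem pvFoldl_congr_inv {α β : Type} (P : α → Prop) (f g : α → β → α) :
    ∀ (l : List β) (a : α), P a → (∀ x b, b ∈ l → P x → P (f x b)) →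
      (∀ x b, b ∈ l → P x → f x b = g x b) → l.foldl f a = l.foldl g a := by
  intro l
  induction l with
  | nil => intros; rfl
  | cons b bs ih =>
    intro a hP hf hc
    simp only [List.foldl_cons]
    rw [← hc a b (List.mem_cons_self ..) hP]
    exact ih (f a b) (hf a b (List.mem_cons_self ..) hP)
      (fun x y hy hx => hf x y (List.mem_cons_of_mem _ hy) hx)
      (fun x y hy hx => hc x y (List.mem_cons_of_mem _ hy) hx)

-- specification of the lce table: length of the longest common prefix
def lcpSpec : List Int → List Int → Nat
  | a :: as, b :: bs => if a = b then lcpSpec as bs + 1 else 0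
  | _, _ => 0

theorem lcpSpec_nil_left (ys : List Int) : lcpSpec [] ys = 0 := by cases ys <;> rfl
theorem lcpSpec_nil_right (xs : List Int) : lcpSpec xs [] = 0 := by cases xs <;> rfl

theorem lcp_ge (m : Nat) (xs ys : List Int) :
    m ≤ lcpSpec xs ys ↔ m ≤ xs.length ∧ m ≤ ys.length ∧ xs.take m = ys.take m := by
  induction xs generalizing ys m with
  | nil =>
    constructor
    · intro h
      have hm : m = 0 := by rw [lcpSpec_nil_left] at h; omega
      subst hm; simp
    · rintro ⟨h, -, -⟩
      have hm : m = 0 := by simp at h; omega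
      subst hm; exact Nat.zero_le _
  | cons a as ih =>
    cases ys with
    | nil =>
      constructor
      · intro h
        have hm : m = 0 := by rw [lcpSpec_nil_right] at h; omega
        subst hm; simp
      · rintro ⟨-, h, -⟩
        have hm : m = 0 := by simp at h; omega
        subst hm; exact Nat.zero_le _
    | cons b bs =>
      cases m with
      | zero => simp
      | succ m =>
        by_cases hab : a = b
        · subst hab
          rw [show lcpSpec (a :: as) (a :: bs) = lcpSpec as bs + 1 from by simp [lcpSpec]]
          simp only [List.length_cons, List.take_succ_cons, List.cons.injEq, true_and,
            Nat.add_le_add_iff_right]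
          exact ih m bs
        · simp [lcpSpec, hab]

-- the all-zero initial table reads 0 everywhere
theorem pvGet_zero_init (n a b : Nat) :
    pvGet 0 (List.replicate (n + 1) (List.replicate (n + 1) (0 : Nat))) a b = 0 := by
  unfold pvGet
  by_cases ha : a < n + 1
  · rw [show (List.replicate (n + 1) (List.replicate (n + 1) (0 : Nat))).getD a [] = List.replicate (n + 1) 0 from by
      rw [List.getD_eq_getElem?_getD, List.getElem?_replicate, if_pos ha]; rfl]
    by_cases hb : b < n + 1
    · rw [List.getD_eq_getElem?_getD, List.getElem?_replicate, if_pos hb]; rfl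
    · rw [List.getD_eq_getElem?_getD, List.getElem?_replicate, if_neg hb]; rfl
  · rw [show (List.replicate (n + 1) (List.replicate (n + 1) (0 : Nat))).getD a [] = [] from by
      rw [List.getD_eq_getElem?_getD, List.getElem?_replicate, if_neg ha]; rfl]
    rfl

theorem zero_init_shaped (n : Nat) :
    pvShaped (n + 1) (n + 1) (List.replicate (n + 1) (List.replicate (n + 1) (0 : Nat))) := by
  constructor
  · simp
  · intro a ha
    rw [List.getD_eq_getElem?_getD, List.getElem?_replicate, if_pos ha]
    simp

-- lce-table correctness: inner loop (one row), then the outer loop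
theorem bLceRow_inv (seq : List Int) (m : Nat) (hm : m < seq.length) :
    ∀ (jc : Nat), jc ≤ seq.length → ∀ (t : List (List Nat)),
    pvShaped (seq.length + 1) (seq.length + 1) t →
    (∀ a b, pvGet 0 t a b = if m + 1 ≤ a then lcpSpec (seq.drop a) (seq.drop b)
          else if a = m ∧ jc ≤ b then lcpSpec (seq.drop a) (seq.drop b) else 0) →
    ∀ a b, pvGet 0 ((List.range jc).reverse.foldl (fun t j =>
        if seq.getD m 0 = seq.getD j 0 then pvSet t m j (pvGet 0 t (m + 1) (j + 1) + 1) else t) t) a b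
      = if m ≤ a then lcpSpec (seq.drop a) (seq.drop b) else 0 := by
  intro jc
  induction jc with
  | zero =>
    intro _ t _ ht a b
    simp only [List.range_zero, List.reverse_nil, List.foldl_nil]
    rw [ht a b]
    rcases Nat.lt_trichotomy a m with h | h | h
    · have h1 : ¬ (m + 1 ≤ a) := by omega
      have h2 : ¬ (m ≤ a) := by omega
      have h3 : a ≠ m := by omega
      simp [h1, h2, h3]
    · subst h; simp
    · have h1 : m + 1 ≤ a := by omega
      have h2 : m ≤ a := by omega
      simp [h1, h2]
  | succ j ih =>
    intro hjc t hsh ht a b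
    rw [List.range_succ, List.reverse_append]
    simp only [List.reverse_singleton, List.singleton_append, List.foldl_cons]
    refine ih (by omega) _ ?_ ?_ a b
    · by_cases heq : seq.getD m 0 = seq.getD j 0
      · rw [if_pos heq]; exact pvShaped_set hsh m j _
      · rw [if_neg heq]; exact hsh
    intro a b
    have hdm : seq.drop m = seq[m] :: seq.drop (m + 1) := List.drop_eq_getElem_cons hm
    have hdj : seq.drop j = seq[j] :: seq.drop (j + 1) := List.drop_eq_getElem_cons (by omega)
    have hgm : seq.getD m 0 = seq[m] := List.getD_eq_getElem seq 0 hm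
    have hgj : seq.getD j 0 = seq[j] := List.getD_eq_getElem seq 0 (by omega)
    have hmt : m < t.length := by rw [hsh.1]; omega
    have hjt : j < (t.getD m []).length := by rw [hsh.2 m (by omega)]; omega
    by_cases heq : seq.getD m 0 = seq.getD j 0
    · rw [if_pos heq]
      by_cases hab : a = m ∧ b = j
      · obtain ⟨ha, hb⟩ := hab; subst ha; subst hb
        have hsm : seq[a] = seq[b] := by rw [← hgm, ← hgj]; exact heq
        have h1 : ¬ (a + 1 ≤ a) := by omega
        rw [pvGet_set_self 0 t a b _ hmt hjt, if_neg h1, if_pos ⟨rfl, le_refl b⟩, hdm, hdj,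
          ht (a + 1) (b + 1)]
        simp [lcpSpec, hsm]
      · rw [pvGet_set_ne 0 t m j a b _ hab, ht a b]
        by_cases h1 : m + 1 ≤ a
        · rw [if_pos h1, if_pos h1]
        · rw [if_neg h1, if_neg h1]
          by_cases h2 : a = m ∧ j ≤ b
          · have hbj : b ≠ j := fun hbj => hab ⟨h2.1, hbj⟩
            have h3 : a = m ∧ j + 1 ≤ b := ⟨h2.1, by omega⟩
            rw [if_pos h3, if_pos h2]
          · have h3 : ¬ (a = m ∧ j + 1 ≤ b) := fun hc => h2 ⟨hc.1, by omega⟩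
            rw [if_neg h3, if_neg h2]
    · rw [if_neg heq, ht a b]
      by_cases h1 : m + 1 ≤ a
      · rw [if_pos h1, if_pos h1]
      · rw [if_neg h1, if_neg h1]
        by_cases h2 : a = m ∧ j ≤ b
        · by_cases hbj : b = j
          · obtain ⟨ha, -⟩ := h2; subst ha; subst hbj
            have hne : ¬ (seq[a] = seq[b]) := by rw [← hgm, ← hgj]; exact heq
            have h3 : ¬ (a = a ∧ b + 1 ≤ b) := by omega
            rw [if_neg h3, if_pos ⟨rfl, le_refl b⟩, hdm, hdj]
            simp [lcpSpec, hne]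
          · have h3 : a = m ∧ j + 1 ≤ b := ⟨h2.1, by omega⟩
            rw [if_pos h3, if_pos h2]
        · have h3 : ¬ (a = m ∧ j + 1 ≤ b) := fun hc => h2 ⟨hc.1, by omega⟩
          rw [if_neg h3, if_neg h2]

theorem bLce_inv (seq : List Int) :
    ∀ (ic : Nat), ic ≤ seq.length → ∀ (t : List (List Nat)),
    pvShaped (seq.length + 1) (seq.length + 1) t →
    (∀ a b, pvGet 0 t a b = if ic ≤ a then lcpSpec (seq.drop a) (seq.drop b) else 0) →
    ∀ a b, pvGet 0 ((List.range ic).reverse.foldl (fun t i => bLceRow seq i t) t) a b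
      = lcpSpec (seq.drop a) (seq.drop b) := by
  intro ic
  induction ic with
  | zero =>
    intro _ t _ ht a b
    simpa using (ht a b)
  | succ p ih =>
    intro hic t hsh ht a b
    rw [List.range_succ, List.reverse_append]
    simp only [List.reverse_singleton, List.singleton_append, List.foldl_cons]
    refine ih (by omega) _ ?_ ?_ a b
    · unfold bLceRow
      apply pvFoldl_inv (pvShaped (seq.length + 1) (seq.length + 1)) _ _ _ hsh
      intro x b hx
      by_cases heq : seq.getD p 0 = seq.getD b 0
      · rw [if_pos heq]; exact pvShaped_set hx p b _
      · rw [if_neg heq]; exact hx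
    intro a b
    unfold bLceRow
    exact bLceRow_inv seq p (by omega) seq.length (le_refl _) t hsh (by
      intro a b
      rw [ht a b]
      by_cases h1 : p + 1 ≤ a
      · simp [h1]
      · by_cases h2 : a = p ∧ seq.length ≤ b
        · have hb : seq.drop b = [] := List.drop_eq_nil_of_le h2.2
          simp [h2, hb, lcpSpec_nil_right]
        · simp [h1, h2]) a b

theorem bLce_correct (seq : List Int) (i j : Nat) :
    pvGet 0 (bLce seq) i j = lcpSpec (seq.drop i) (seq.drop j) := by
  unfold bLce
  apply bLce_inv seq seq.length (le_refl _) _ (zero_init_shaped seq.length)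
  intro a b
  rw [pvGet_zero_init]
  by_cases h : seq.length ≤ a
  · have ha : seq.drop a = [] := List.drop_eq_nil_of_le h
    rw [if_pos h, ha, lcpSpec_nil_left]
  · rw [if_neg h]

theorem flatten_replicate_length (q : Nat) (s : List Int) :
    (List.replicate q s).flatten.length = q * s.length := by
  induction q with
  | zero => simp
  | succ p ih =>
    rw [List.replicate_succ, List.flatten_cons, List.length_append, ih, Nat.succ_mul]
    ring

-- repetition ↔ period (the two directions of the classical lemma)
theorem period_of_rep (q k : Nat) (t : List Int) (_hk : 0 < k) (hlen : t.length = q * k)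
    (h : (List.replicate q (t.take k)).flatten = t) : t.drop k = t.take (t.length - k) := by
  cases q with
  | zero =>
    have ht : t = [] := List.eq_nil_of_length_eq_zero (by omega)
    subst ht; simp
  | succ p =>
    have hs : (p + 1) * k = p * k + k := Nat.succ_mul p k
    have hkt : k ≤ t.length := by omega
    have hsl : (t.take k).length = k := by rw [List.length_take]; omega
    have hul : (List.replicate p (t.take k)).flatten.length = p * k := by
      rw [flatten_replicate_length, hsl]
    have h1 : t = t.take k ++ (List.replicate p (t.take k)).flatten := by
      conv_lhs => rw [← h]
      rw [List.replicate_succ, List.flatten_cons]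
    have h2 : t = (List.replicate p (t.take k)).flatten ++ t.take k := by
      conv_lhs => rw [← h]
      rw [List.replicate_succ', List.flatten_append]
      simp
    have hd : t.drop k = (List.replicate p (t.take k)).flatten := by
      have hx := List.drop_left' (l₂ := (List.replicate p (t.take k)).flatten) hsl
      rw [← h1] at hx
      exact hx
    have hL : (List.replicate p (t.take k)).flatten.length = t.length - k := by omega
    have htk : t.take (t.length - k) = (List.replicate p (t.take k)).flatten := by
      have hx := List.take_left' (l₂ := t.take k) hL
      rw [← h2] at hx
      exact hx
    rw [hd, htk]

theorem rep_of_period (q k : Nat) (_hk : 0 < k) :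
    ∀ (t : List Int), t.length = q * k → t.drop k = t.take (t.length - k) →
      (List.replicate q (t.take k)).flatten = t := by
  induction q with
  | zero =>
    intro t hlen _
    have ht : t = [] := List.eq_nil_of_length_eq_zero (by omega)
    subst ht; simp
  | succ p ih =>
    intro t hlen h
    have hs : (p + 1) * k = p * k + k := Nat.succ_mul p k
    have hkt : k ≤ t.length := by omega
    rw [List.replicate_succ, List.flatten_cons]
    conv_rhs => rw [← List.take_append_drop k t]
    congr 1
    by_cases hp : p = 0
    · subst hp
      simp only [List.replicate_zero, List.flatten_nil]
      symm
      exact List.drop_eq_nil_of_le (by omega)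
    · have hkp : 1 * k ≤ p * k := Nat.mul_le_mul_right k (by omega)
      have hul : (t.drop k).length = p * k := by rw [List.length_drop]; omega
      have hueq : t.drop k = t.take (p * k) := by
        rw [h]; congr 1; omega
      have htk : (t.drop k).take k = t.take k := by
        rw [hueq, List.take_take]
        congr 1
        omega
      have hud : (t.drop k).drop k = (t.drop k).take ((t.drop k).length - k) := by
        calc (t.drop k).drop k = (t.take (p * k)).drop k := by rw [hueq]
          _ = (t.drop k).take (p * k - k) := by rw [List.drop_take]
          _ = (t.drop k).take ((t.drop k).length - k) := by rw [hul]
      rw [← htk]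
      exact ih (t.drop k) hul hud

theorem cond_equiv (seq : List Int) (len l k : Nat) (h1 : 1 ≤ k) (hk : k < len)
    (hl : l + len ≤ seq.length) (hdvd : len % k = 0) :
    ((List.replicate (len / k) ((pvSeg seq l len).take k)).flatten = pvSeg seq l len) ↔
      (len - k ≤ lcpSpec (seq.drop l) (seq.drop (l + k))) := by
  have hdvd' : k ∣ len := Nat.dvd_of_mod_eq_zero hdvd
  have hdl : len ≤ (seq.drop l).length := by rw [List.length_drop]; omega
  have htl : (pvSeg seq l len).length = len := by
    unfold pvSeg; rw [List.length_take]; omega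
  have hdk : seq.drop (l + k) = (seq.drop l).drop k := by
    rw [List.drop_drop]
  have hlen' : (pvSeg seq l len).length = (len / k) * k := by
    rw [htl, Nat.div_mul_cancel hdvd']
  have e1 : (pvSeg seq l len).take (len - k) = (seq.drop l).take (len - k) := by
    unfold pvSeg; rw [List.take_take]; congr 1; omega
  have e2 : (pvSeg seq l len).drop k = (seq.drop (l + k)).take (len - k) := by
    unfold pvSeg; rw [List.drop_take, hdk]
  rw [lcp_ge]
  constructor
  · intro h
    have hper := period_of_rep (len / k) k (pvSeg seq l len) (by omega) hlen' h
    rw [htl] at hper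
    refine ⟨by omega, by rw [List.length_drop]; omega, ?_⟩
    rw [← e1, ← hper, e2]
  · rintro ⟨-, -, heq⟩
    apply rep_of_period (len / k) k (by omega) (pvSeg seq l len) hlen'
    rw [htl, e1, e2]
    exact heq.symm

-- A's repetition loop extracted to an accumulator
def aRepAcc (seq : List Int) (len l : Nat) (dp : List (List Int)) (best : Int) : Int :=
  (List.range' 1 (len - 1)).foldl (fun best k =>
    if len % k = 0 ∧ (List.replicate (len / k) ((pvSeg seq l len).take k)).flatten = pvSeg seq l len
    then min best (pvGet 0 dp l (l + k)) else best) best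

theorem aRep_gen (seq : List Int) (len l : Nat) (dp : List (List Int))
    (hil : l < dp.length) (hir : l + len < (dp.getD l []).length) :
    ∀ (ks : List Nat), (∀ k ∈ ks, k ≠ len) → ∀ (acc : Int),
    ks.foldl (fun dp k =>
        if len % k = 0 ∧ (List.replicate (len / k) ((pvSeg seq l len).take k)).flatten = pvSeg seq l len
        then pvSet dp l (l + len) (min (pvGet 0 dp l (l + len)) (pvGet 0 dp l (l + k))) else dp)
      (pvSet dp l (l + len) acc)
    = pvSet dp l (l + len) (ks.foldl (fun best k =>
        if len % k = 0 ∧ (List.replicate (len / k) ((pvSeg seq l len).take k)).flatten = pvSeg seq l len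
        then min best (pvGet 0 dp l (l + k)) else best) acc) := by
  intro ks
  induction ks with
  | nil => intro _ acc; simp
  | cons k ks ih =>
    intro hne acc
    simp only [List.foldl_cons]
    have hkl : ¬ (l = l ∧ l + k = l + len) := by
      intro hc
      exact hne k (List.mem_cons_self ..) (by omega)
    by_cases hc : len % k = 0 ∧ (List.replicate (len / k) ((pvSeg seq l len).take k)).flatten = pvSeg seq l len
    · rw [if_pos hc, if_pos hc, pvGet_set_self 0 dp l (l + len) acc hil hir,
        pvGet_set_ne 0 dp l (l + len) l (l + k) acc hkl, pvSet_set]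
      exact ih (fun x hx => hne x (List.mem_cons_of_mem _ hx)) _
    · rw [if_neg hc, if_neg hc]
      exact ih (fun x hx => hne x (List.mem_cons_of_mem _ hx)) _

theorem aRep_acc (seq : List Int) (len l : Nat) (dp : List (List Int))
    (hil : l < dp.length) (hir : l + len < (dp.getD l []).length) :
    aRep seq len l dp = pvSet dp l (l + len) (aRepAcc seq len l dp (pvGet 0 dp l (l + len))) := by
  unfold aRep aRepAcc
  conv_lhs => rw [← pvSet_eta 0 dp l (l + len)]
  apply aRep_gen seq len l dp hil hir
  intro k hk
  have := List.mem_range'_1.mp hk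
  omega

theorem aSplit_gen (len l : Nat) (dp : List (List Int))
    (hil : l < dp.length) (hir : l + len < (dp.getD l []).length) :
    ∀ (ms : List Nat), (∀ m ∈ ms, m ≠ l ∧ m ≠ l + len) → ∀ (acc : Int),
    ms.foldl (fun dp m =>
        if pvGet 0 dp l m + pvGet 0 dp m (l + len) < pvGet 0 dp l (l + len)
        then pvSet dp l (l + len) (pvGet 0 dp l m + pvGet 0 dp m (l + len)) else dp)
      (pvSet dp l (l + len) acc)
    = pvSet dp l (l + len) (ms.foldl (fun best m =>
        if pvGet 0 dp l m + pvGet 0 dp m (l + len) < best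
        then pvGet 0 dp l m + pvGet 0 dp m (l + len) else best) acc) := by
  intro ms
  induction ms with
  | nil => intro _ acc; simp
  | cons m ms ih =>
    intro hne acc
    obtain ⟨hml, hmr⟩ := hne m (List.mem_cons_self ..)
    simp only [List.foldl_cons]
    rw [pvGet_set_ne 0 dp l (l + len) l m acc (by omega),
        pvGet_set_ne 0 dp l (l + len) m (l + len) acc (by omega),
        pvGet_set_self 0 dp l (l + len) acc hil hir]
    by_cases hc : pvGet 0 dp l m + pvGet 0 dp m (l + len) < acc
    · rw [if_pos hc, if_pos hc, pvSet_set]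
      exact ih (fun x hx => hne x (List.mem_cons_of_mem _ hx)) _
    · rw [if_neg hc, if_neg hc]
      exact ih (fun x hx => hne x (List.mem_cons_of_mem _ hx)) _

theorem aSplit_acc (len l : Nat) (dp : List (List Int))
    (hil : l < dp.length) (hir : l + len < (dp.getD l []).length) :
    aSplit len l dp = pvSet dp l (l + len) (bSplit len l dp (pvGet 0 dp l (l + len))) := by
  unfold aSplit bSplit
  conv_lhs => rw [← pvSet_eta 0 dp l (l + len)]
  apply aSplit_gen len l dp hil hir
  intro m hm
  have := List.mem_range'_1.mp hm
  omega

theorem bSplit_upd (len l : Nat) (dp : List (List Int)) (v : Int) (acc : Int) :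
    bSplit len l (pvSet dp l (l + len) v) acc = bSplit len l dp acc := by
  unfold bSplit
  apply PySem.List.foldl_congr_mem
  intro best m hm
  have := List.mem_range'_1.mp hm
  rw [pvGet_set_ne 0 dp l (l + len) l m v (by omega),
      pvGet_set_ne 0 dp l (l + len) m (l + len) v (by omega)]

theorem aCap_upd (K : Int) (l r : Nat) (dp : List (List Int)) (v : Int)
    (hil : l < dp.length) (hir : r < (dp.getD l []).length) :
    aCap K l r (pvSet dp l r v) = pvSet dp l r (if v > K then K + 1 else v) := by
  unfold aCap
  rw [pvGet_set_self 0 dp l r v hil hir]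
  by_cases h : v > K
  · rw [if_pos h, if_pos h, pvSet_set]
  · rw [if_neg h, if_neg h]

theorem repAcc_eq_bRep (seq : List Int) (len l : Nat) (hl : l + len ≤ seq.length)
    (dp : List (List Int)) (acc : Int) :
    aRepAcc seq len l dp acc = bRep (bLce seq) len l dp acc := by
  unfold aRepAcc bRep
  apply PySem.List.foldl_congr_mem
  intro best k hk
  have hmem := List.mem_range'_1.mp hk
  by_cases hmod : len % k = 0
  · have hiff := cond_equiv seq len l k (by omega) (by omega) hl hmod
    rw [bLce_correct]
    by_cases hcond : (List.replicate (len / k) ((pvSeg seq l len).take k)).flatten = pvSeg seq l len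
    · rw [if_pos ⟨hmod, hcond⟩]
      have hB : len - k ≤ lcpSpec (seq.drop l) (seq.drop (l + k)) := hiff.mp hcond
      by_cases hlt : pvGet 0 dp l (l + k) < best
      · rw [if_pos ⟨hmod, hB, hlt⟩]
        exact min_eq_right (le_of_lt hlt)
      · rw [if_neg (fun hc => hlt hc.2.2)]
        exact min_eq_left (by omega)
    · rw [if_neg (fun hc => hcond hc.2), if_neg (fun hc => hcond (hiff.mpr hc.2.1))]
  · rw [if_neg (fun hc => hmod hc.1), if_neg (fun hc => hmod hc.1)]

theorem cell_eq (seq : List Int) (K : Int) (len l : Nat) (h1 : 1 ≤ len)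
    (hl : l + len ≤ seq.length) (dp : List (List Int))
    (hsh : pvShaped seq.length (seq.length + 1) dp) :
    aCell seq K len l dp = bCell K (bLce seq) len l dp := by
  have hil : l < dp.length := by rw [hsh.1]; omega
  have hir : l + len < (dp.getD l []).length := by rw [hsh.2 l (by omega)]; omega
  unfold aCell bCell
  rw [aRep_acc seq len l dp hil hir, aSplit_acc len l _ (by rw [(pvShaped_set hsh l (l + len) _).1]; omega) (by rw [(pvShaped_set hsh l (l + len) _).2 l (by omega)]; omega),
      pvGet_set_self 0 dp l (l + len) _ hil hir, pvSet_set, bSplit_upd,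
      aCap_upd K l (l + len) dp _ hil hir, repAcc_eq_bRep seq len l hl]
  congr 1
  by_cases h : bSplit len l dp (bRep (bLce seq) len l dp (pvGet 0 dp l (l + len))) ≤ K
  · rw [if_neg (by omega), if_pos h]
  · rw [if_pos (by omega), if_neg h]

theorem aCell_shaped (seq : List Int) (K : Int) (len l : Nat) (dp : List (List Int))
    (hsh : pvShaped seq.length (seq.length + 1) dp) :
    pvShaped seq.length (seq.length + 1) (aCell seq K len l dp) := by
  unfold aCell aCap
  have h2 : pvShaped seq.length (seq.length + 1) (aSplit len l (aRep seq len l dp)) := by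
    unfold aSplit
    apply pvFoldl_inv (pvShaped seq.length (seq.length + 1))
    · unfold aRep
      apply pvFoldl_inv (pvShaped seq.length (seq.length + 1)) _ _ _ hsh
      intro x b hx
      by_cases hc : len % b = 0 ∧ (List.replicate (len / b) ((pvSeg seq l len).take b)).flatten = pvSeg seq l len
      · rw [if_pos hc]; exact pvShaped_set hx l (l + len) _
      · rw [if_neg hc]; exact hx
    · intro x b hx
      by_cases hc : pvGet 0 x l b + pvGet 0 x b (l + len) < pvGet 0 x l (l + len)
      · rw [if_pos hc]; exact pvShaped_set hx l (l + len) _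
      · rw [if_neg hc]; exact hx
  by_cases hc : pvGet 0 (aSplit len l (aRep seq len l dp)) l (l + len) > K
  · rw [if_pos hc]; exact pvShaped_set h2 l (l + len) _
  · rw [if_neg hc]; exact h2

theorem base_shaped (seq : List Int) (K : Int) :
    pvShaped seq.length (seq.length + 1)
      ((List.range seq.length).foldl (fun dp i => pvSet dp i (i + 1) 1)
        (List.replicate seq.length (List.replicate (seq.length + 1) (K + 1)))) := by
  apply pvFoldl_inv (pvShaped seq.length (seq.length + 1))
  · constructor
    · simp
    · intro a ha
      rw [List.getD_eq_getElem?_getD, List.getElem?_replicate, if_pos ha]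
      simp
  · intro x b hx
    exact pvShaped_set hx b (b + 1) 1

theorem main_eq (seq : List Int) (K : Int) : aMain seq K = bMain seq K := by
  unfold aMain bMain
  apply pvFoldl_congr_inv (pvShaped seq.length (seq.length + 1))
  · exact base_shaped seq K
  · intro x len _ hx
    apply pvFoldl_inv (pvShaped seq.length (seq.length + 1)) _ _ _ hx
    intro y l hy
    exact aCell_shaped seq K len l y hy
  · intro x len hlen hx
    have h := List.mem_range'_1.mp hlen
    apply pvFoldl_congr_inv (pvShaped seq.length (seq.length + 1)) _ _ _ _ hx
    · intro y l _ hy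
      exact aCell_shaped seq K len l y hy
    · intro y l hml hy
      have h2 := List.mem_range.mp hml
      exact cell_eq seq K len l (by omega) (by omega) y hy

-- ===== VERDICT (by name: the statement is the Claim_ definition above) =====
theorem min_prints_spec : Claim_equal_min_prints := by
  intro seq K _ _
  unfold Spec_min_prints min_prints min_prints_alt
  rw [main_eq]
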